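-- pv_equiv track=rewrite | github.com/dariviro1/Dynamo-codes | Current_functions.py | group_by_string
-- ===== SOURCE A (Python) =====
-- def group_by_string(_list_of_lists, _keyword):
--     """
--     Groups a list of lists every time a sublist starts with a string that contains the given keyword.
--
--     Args:
--         _list_of_lists (list): A list of sublists.
--         _keyword (str): The string to search for in the first element of each sublist.
--
--     Returns:
--         list: A list of grouped sublists.
--     """
--     grouped = []
--     current_group = []
--
--     for sublist in _list_of_lists:
--         if sublist and isinstance(sublist[0], str) and _keyword in sublist[0]:
--             if current_group:
--                 grouped.append(current_group)
--             current_group = [sublist]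
--         else:
--             current_group.append(sublist)
--
--     if current_group:
--         grouped.append(current_group)
--
--     return grouped
-- ===== SOURCE B (Python) =====
-- def group_by_string(_list_of_lists, _keyword):
--     """Index-based re-implementation: scan for the next delimiter index and
--     emit the slice between consecutive delimiters (iterative, no accumulator flush)."""
--     def _is_delim(sublist):
--         return bool(sublist) and isinstance(sublist[0], str) and _keyword in sublist[0]
--
--     groups = []
--     i, n = 0, len(_list_of_lists)
--     while i < n:
--         j = i + 1
--         while j < n and not _is_delim(_list_of_lists[j]):
--             j += 1
--         groups.append(_list_of_lists[i:j])
--         i = j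
--     return groups
-- ===== Notes on version B (the rewrite author's own statement) =====
-- stated objective: alternative
-- what changed: Replaces the accumulator loop with flush-on-delimiter by an index/slice scheme: an outer index walks the list, an inner scan finds the next delimiter index, and each group is emitted as one slice _list_of_lists[i:j].
import Mathlib
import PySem

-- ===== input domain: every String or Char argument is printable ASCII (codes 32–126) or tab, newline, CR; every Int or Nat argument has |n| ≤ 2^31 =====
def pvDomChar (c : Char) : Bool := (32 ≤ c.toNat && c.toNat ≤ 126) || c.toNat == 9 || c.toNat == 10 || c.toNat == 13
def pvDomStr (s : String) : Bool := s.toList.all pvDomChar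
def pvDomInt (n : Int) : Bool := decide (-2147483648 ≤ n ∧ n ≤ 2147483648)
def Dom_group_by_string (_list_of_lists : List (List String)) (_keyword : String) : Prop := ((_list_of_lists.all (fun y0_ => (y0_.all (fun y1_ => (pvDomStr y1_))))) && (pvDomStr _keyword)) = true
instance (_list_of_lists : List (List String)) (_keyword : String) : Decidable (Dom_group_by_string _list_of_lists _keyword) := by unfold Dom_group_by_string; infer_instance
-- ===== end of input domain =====

-- B replaces A's accumulator-and-flush loop by an index walk that emits each group
-- as one slice between consecutive delimiter indices (alternative decomposition, same cost).

-- ===== PORT A =====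
-- A's loop over sublists with state (grouped, current_group); the final
-- 'if current_group: grouped.append(current_group)' is the 'if st.2.isEmpty' below.
-- 'isinstance(sublist[0], str)' is always True on List String and is omitted.
def group_by_string (_list_of_lists : List (List String)) (_keyword : String) : List (List (List String)) :=
  let st := _list_of_lists.foldl
    (fun (st : List (List (List String)) × List (List String)) sub =>
      if !sub.isEmpty && PySem.Str.isIn _keyword (sub.headD "") then
        ((if st.2.isEmpty then st.1 else st.1 ++ [st.2]), [sub])
      else
        (st.1, st.2 ++ [sub]))
    (([] : List (List (List String))), ([] : List (List String)))
  if st.2.isEmpty then st.1 else st.1 ++ [st.2]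

-- ===== PORT B =====
-- B's _is_delim ('isinstance' always True on List String, omitted)
def pvDelim (_keyword : String) (sub : List String) : Bool :=
  !sub.isEmpty && PySem.Str.isIn _keyword (sub.headD "")

-- inner while loop: 'j = i+1; while j < n and not _is_delim(xs[j]): j += 1'
def pvScan (_keyword : String) (xs : List (List String)) (j : Nat) : Nat :=
  if h : j < xs.length then
    if pvDelim _keyword (xs[j]'h) then j else pvScan _keyword xs (j + 1)
  else j
termination_by xs.length - j

theorem pvScan_start_le (kw : String) (xs : List (List String)) (j : Nat) :
    j ≤ pvScan kw xs j := by
  unfold pvScan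
  split
  · split
    · exact le_refl _
    · have := pvScan_start_le kw xs (j + 1)
      omega
  · exact le_refl _
termination_by xs.length - j

-- outer while loop over the index i; groups are appended as slices xs[i:j]
-- (ported as (xs.take j).drop i — exact for 0 ≤ i ≤ j, take clamps as Python does)
def pvGo (_keyword : String) (xs : List (List String)) (groups : List (List (List String))) (i : Nat) : List (List (List String)) :=
  if _h : i < xs.length then
    let j := pvScan _keyword xs (i + 1)
    pvGo _keyword xs (groups ++ [(xs.take j).drop i]) j
  else groups
termination_by xs.length - i
decreasing_by
  have := pvScan_start_le _keyword xs (i + 1)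
  omega

def group_by_string_alt (_list_of_lists : List (List String)) (_keyword : String) : List (List (List String)) :=
  pvGo _keyword _list_of_lists [] 0

-- ===== PRECONDITION & SPEC =====
def Spec_group_by_string (_list_of_lists : List (List String)) (_keyword : String) (out : List (List (List String))) : Prop := out = group_by_string_alt _list_of_lists _keyword
instance (_list_of_lists : List (List String)) (_keyword : String) (out : List (List (List String))) : Decidable (Spec_group_by_string _list_of_lists _keyword out) := by unfold Spec_group_by_string; infer_instance

-- ===== CLAIM (what is proved, stated in full; the proofs are below) =====
def Claim_equal_group_by_string : Prop := ∀ (_list_of_lists : List (List String)) (_keyword : String), Dom_group_by_string _list_of_lists _keyword → Spec_group_by_string _list_of_lists _keyword (group_by_string _list_of_lists _keyword)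

-- ===== LEMMAS AND PROOFS =====

theorem pv_drop_length_takeWhile {A : Type} (p : A → Bool) (l : List A) :
    l.drop (l.takeWhile p).length = l.dropWhile p := by
  induction l with
  | nil => rfl
  | cons a t ih => by_cases h : p a <;> simp [h, ih]

-- common recursive characterisation: groups split exactly before each delimiter
def pvG (kw : String) (xs : List (List String)) : List (List (List String)) :=
  match xs with
  | [] => []
  | h :: t =>
    (h :: t.takeWhile (fun s => !pvDelim kw s)) :: pvG kw (t.dropWhile (fun s => !pvDelim kw s))
termination_by xs.length
decreasing_by
  have := List.length_dropWhile_le (fun s => !pvDelim kw s) t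
  simpa using Nat.lt_succ_of_le this

def pvStep (kw : String) : List (List (List String)) × List (List String) → List String → List (List (List String)) × List (List String) :=
  fun st sub =>
    if !sub.isEmpty && PySem.Str.isIn kw (sub.headD "") then
      ((if st.2.isEmpty then st.1 else st.1 ++ [st.2]), [sub])
    else (st.1, st.2 ++ [sub])

def pvFin (st : List (List (List String)) × List (List String)) : List (List (List String)) :=
  if st.2.isEmpty then st.1 else st.1 ++ [st.2]

theorem pvA_eq_fold (xs : List (List String)) (kw : String) :
    group_by_string xs kw = pvFin (xs.foldl (pvStep kw) ([], [])) := rfl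

theorem pvShift (kw : String) (xs : List (List String)) :
    ∀ g c, pvFin (xs.foldl (pvStep kw) (g, c)) = g ++ pvFin (xs.foldl (pvStep kw) ([], c)) := by
  induction xs with
  | nil => intro g c; simp [pvFin]; split <;> simp
  | cons s t ih =>
    intro g c
    simp only [List.foldl_cons, pvStep]
    split
    · rw [ih, ih (if c.isEmpty then [] else [] ++ [c])]
      split <;> simp
    · exact ih g (c ++ [s])

theorem pvOpen (kw : String) (xs : List (List String)) :
    ∀ c, c ≠ [] → pvFin (xs.foldl (pvStep kw) ([], c)) =
      (c ++ xs.takeWhile (fun s => !pvDelim kw s)) :: pvG kw (xs.dropWhile (fun s => !pvDelim kw s)) := by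
  induction xs with
  | nil => intro c hc; simp [pvFin, hc, pvG]
  | cons s t ih =>
    intro c hc
    simp only [List.foldl_cons, pvStep]
    by_cases hd : pvDelim kw s = true
    · rw [if_pos (by simpa [pvDelim] using hd)]
      rw [if_neg (show ¬ (c.isEmpty = true) from by simpa [List.isEmpty_iff] using hc)]
      rw [pvShift kw t ([] ++ [c]) [s], ih [s] (by simp)]
      rw [List.takeWhile_cons, List.dropWhile_cons]
      simp [hd, pvG]
    · rw [if_neg (by simpa [pvDelim] using hd)]
      rw [ih (c ++ [s]) (by simp)]
      rw [List.takeWhile_cons, List.dropWhile_cons]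
      simp [hd]
  
theorem pvA_eq_pvG (xs : List (List String)) (kw : String) :
    group_by_string xs kw = pvG kw xs := by
  rw [pvA_eq_fold]
  cases xs with
  | nil => simp [pvFin, pvG]
  | cons h t =>
    simp only [List.foldl_cons, pvStep]
    have : pvFin (t.foldl (pvStep kw) ([], [h])) =
        ([h] ++ t.takeWhile (fun s => !pvDelim kw s)) :: pvG kw (t.dropWhile (fun s => !pvDelim kw s)) :=
      pvOpen kw t [h] (by simp)
    by_cases hd : pvDelim kw h = true
    · rw [if_pos (by simpa [pvDelim] using hd)]
      simpa [pvG] using this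
    · rw [if_neg (by simpa [pvDelim] using hd)]
      simpa [pvG] using this

theorem pvScan_eq (kw : String) (xs : List (List String)) (j : Nat) :
    pvScan kw xs j = j + ((xs.drop j).takeWhile (fun s => !pvDelim kw s)).length := by
  unfold pvScan
  split
  · rename_i h
    rw [← List.getElem_cons_drop h, List.takeWhile_cons]
    by_cases hd : pvDelim kw xs[j] = true
    · simp [hd]
    · rw [pvScan_eq kw xs (j + 1)]
      simp [hd]
      omega
  · rename_i h
    rw [List.drop_eq_nil_of_le (by omega)]
    simp
termination_by xs.length - j

theorem pvGo_eq (kw : String) (xs : List (List String)) (i : Nat) :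
    ∀ groups, pvGo kw xs groups i = groups ++ pvG kw (xs.drop i) := by
  induction hn : xs.length - i using Nat.strong_induction_on generalizing i with
  | _ n ih =>
    intro groups
    unfold pvGo
    split
    · rename_i h
      set L := ((xs.drop (i+1)).takeWhile (fun s => !pvDelim kw s)).length with hL
      have hscan : pvScan kw xs (i + 1) = (i + 1) + L := pvScan_eq kw xs (i + 1)
      have htw : (xs.drop (i+1)).takeWhile (fun s => !pvDelim kw s) <+: xs.drop (i+1) :=
        List.takeWhile_prefix _
      have hdropi : xs.drop i = xs[i] :: xs.drop (i + 1) := (List.getElem_cons_drop h).symm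
      have hslice : (xs.take (pvScan kw xs (i+1))).drop i =
          xs[i] :: (xs.drop (i+1)).takeWhile (fun s => !pvDelim kw s) := by
        rw [hscan, List.drop_take, hdropi]
        have hLi : i + 1 + L - i = L + 1 := by omega
        rw [hLi, List.take_succ_cons, hL]
        congr 1
        exact (List.prefix_iff_eq_take.mp htw).symm
      have hdropj : xs.drop (pvScan kw xs (i+1)) =
          (xs.drop (i+1)).dropWhile (fun s => !pvDelim kw s) := by
        rw [hscan]
        have h1 : xs.drop (i + 1 + L) = (xs.drop (i+1)).drop L := List.drop_drop.symm
        rw [h1, hL]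
        exact pv_drop_length_takeWhile _ _
      rw [ih (xs.length - pvScan kw xs (i+1))
            (by have := pvScan_start_le kw xs (i+1); omega) _ rfl]
      rw [hdropj]
      conv_rhs => rw [hdropi]
      rw [pvG]
      simp [hslice]
    · rename_i h
      rw [List.drop_eq_nil_of_le (by omega)]
      simp [pvG]

theorem pvB_eq_pvG (xs : List (List String)) (kw : String) :
    group_by_string_alt xs kw = pvG kw xs := by
  unfold group_by_string_alt
  rw [pvGo_eq kw xs 0]
  simp

-- ===== VERDICT (by name: the statement is the Claim_ definition above) =====
theorem group_by_string_spec : Claim_equal_group_by_string := by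
  intro xs kw _
  unfold Spec_group_by_string
  rw [pvA_eq_pvG, pvB_eq_pvG]
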